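-- pv_equiv track=rewrite | github.com/edwste/latin_square_permutations_and_transposition_graphs | permutation_transposition_graph.py | get_non_intersecting_permutations
-- ===== SOURCE A (Python) =====
-- def generate_n_permutation_elements(n):
--     l=[i for i in range(1,n+1)]
--     import itertools as it
--     return it.permutations(l)
--
-- def get_non_intersecting_permutations(i,n):
--     permutations = [i for i in generate_n_permutation_elements(n)]
--     permutation_intersections = []
--     for j in permutations:
--         if i==j:
--             next
--         flag=False
--         for c,a in enumerate(j):
--             if a==i[c]:
--                 flag=True
--                 break
--         if not flag:
--             permutation_intersections.append(j)
--     return permutation_intersections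
-- ===== SOURCE B (Python) =====
-- def get_non_intersecting_permutations(i, n):
--     # Backtracking: build permutations of 1..n position by position, skipping any
--     # value equal to i[pos]; recursion order reproduces itertools' lexicographic order.
--     out = []
--
--     def rec(pos, remaining, acc):
--         if not remaining:
--             out.append(acc)
--             return
--         for k, v in enumerate(remaining):
--             if v != i[pos]:
--                 rec(pos + 1, remaining[:k] + remaining[k + 1:], acc + (v,))
--
--     rec(0, list(range(1, n + 1)), ())
--     return out
-- ===== Notes on version B (the rewrite author's own statement) =====
-- stated objective: faster
-- what changed: Replaced generate-all-n!-permutations-then-filter with a recursive backtracking generator that builds permutations position by position and prunes any branch whose next value would equal i[pos], emitting results in the same lexicographic order.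
import Mathlib
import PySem

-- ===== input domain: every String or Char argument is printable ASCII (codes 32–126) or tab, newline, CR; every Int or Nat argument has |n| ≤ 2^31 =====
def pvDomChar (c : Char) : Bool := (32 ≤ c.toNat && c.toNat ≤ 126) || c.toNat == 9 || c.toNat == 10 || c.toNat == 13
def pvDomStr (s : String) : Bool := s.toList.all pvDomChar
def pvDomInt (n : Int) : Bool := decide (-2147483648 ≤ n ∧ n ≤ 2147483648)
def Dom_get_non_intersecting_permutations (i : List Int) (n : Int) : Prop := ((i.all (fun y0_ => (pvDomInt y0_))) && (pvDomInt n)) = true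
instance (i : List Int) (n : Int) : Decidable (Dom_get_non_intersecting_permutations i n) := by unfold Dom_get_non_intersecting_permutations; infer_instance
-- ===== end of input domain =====

-- B replaces A's generate-all-permutations-then-filter with a recursive backtracking
-- generator that prunes a branch as soon as a position would agree with i (objective:
-- faster by pruning; same results in the same lexicographic order).

-- ===== PORT A =====
-- inner loop 'for c,a in enumerate(j): if a == i[c]: flag=True; break' — true iff some
-- position of j (counting from c) equals i there; i[c] via pyGet? (none = IndexError,
-- excluded by Pre_, where it simply never equals 'some a')
def aFlag (i : List Int) (j : List Int) (c : Nat) : Bool :=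
  match j with
  | [] => false
  | a :: rest => if PySem.List.pyGet? i (c : Int) = some a then true else aFlag i rest (c + 1)

-- 'permutations = [i for i in generate_n_permutation_elements(n)]' with
-- generate_n_permutation_elements(n) = itertools.permutations(list(range(1, n+1))),
-- then the filtering loop ('if i==j: next' is a no-op in the Python and is dropped)
def get_non_intersecting_permutations (i : List Int) (n : Int) : List (List Int) :=
  let l := PySem.List.pyRange 1 (n + 1) 1
  let permutations := PySem.List.permutations l l.length
  permutations.foldl (fun acc j => if aFlag i j 0 then acc else acc ++ [j]) []

-- ===== PORT B =====
-- Source B's rec: bRec = the function body (empty 'remaining' appends acc), bLoop = the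
-- 'for k, v in enumerate(remaining)' loop with remaining = left ++ right, k = left.length;
-- 'v != i[pos]' via pyGet? (none = IndexError, excluded by Pre_, where it counts as ≠)
mutual
def bRec (i : List Int) (pos : Nat) (remaining : List Int) (acc : List Int) : List (List Int) :=
  match remaining with
  | [] => [acc]
  | v :: rest => bLoop i pos [] (v :: rest) acc
  termination_by (remaining.length, 1, 0)
  decreasing_by simp_wf; simp [Prod.lex_iff]
def bLoop (i : List Int) (pos : Nat) (left right : List Int) (acc : List Int) : List (List Int) :=
  match right with
  | [] => []
  | v :: rest =>
      (if PySem.List.pyGet? i (pos : Int) ≠ some v then bRec i (pos + 1) (left ++ rest) (acc ++ [v]) else [])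
        ++ bLoop i pos (left ++ [v]) rest acc
  termination_by (left.length + right.length, 0, right.length)
  decreasing_by all_goals (simp_wf; simp [Prod.lex_iff]; try omega)
end

def get_non_intersecting_permutations_alt (i : List Int) (n : Int) : List (List Int) :=
  bRec i 0 (PySem.List.pyRange 1 (n + 1) 1) []

-- ===== PRECONDITION & SPEC =====
-- Pre_ excludes exactly the inputs where the Python A raises IndexError (some permutation
-- reaches a position c ≥ len(i) and 'i[c]' fails): 0 < n with len(i) < n.
def Pre_get_non_intersecting_permutations (i : List Int) (n : Int) : Prop :=
  n ≤ 0 ∨ n ≤ (i.length : Int)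
instance (i : List Int) (n : Int) : Decidable (Pre_get_non_intersecting_permutations i n) := by
  unfold Pre_get_non_intersecting_permutations; infer_instance

def pvWitness_get_non_intersecting_permutations : List Int × Int := ([2, 1, 3], 3)

def Spec_get_non_intersecting_permutations (i : List Int) (n : Int) (out : List (List Int)) : Prop := out = get_non_intersecting_permutations_alt i n
instance (i : List Int) (n : Int) (out : List (List Int)) : Decidable (Spec_get_non_intersecting_permutations i n out) := by unfold Spec_get_non_intersecting_permutations; infer_instance

-- ===== CLAIM (what is proved, stated in full; the proofs are below) =====
def Claim_equal_get_non_intersecting_permutations : Prop := ∀ (i : List Int) (n : Int), Dom_get_non_intersecting_permutations i n → Pre_get_non_intersecting_permutations i n → Spec_get_non_intersecting_permutations i n (get_non_intersecting_permutations i n)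

-- ===== LEMMAS AND PROOFS =====

-- one unfolding of the prelude's permutations at a successor budget
lemma perms_succ (xs : List Int) (r : Nat) :
    PySem.List.permutations xs (r + 1)
      = (List.range xs.length).flatMap (fun k =>
          match xs[k]? with
          | none => []
          | some v => (PySem.List.permutations (xs.eraseIdx k) r).map (fun p => v :: p)) := by
  rw [PySem.List.permutations]; congr 1; funext k; cases xs[k]? <;> rfl

-- the loop bLoop i pos left right matches the tail (indices ≥ left.length) of the
-- flatMap defining permutations (left ++ right), filtered by A's test and prefixed by acc
lemma loop_eq (i : List Int) (N : Nat)
    (IH : ∀ (rem : List Int) (pos : Nat) (acc : List Int), rem.length ≤ N →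
      bRec i pos rem acc
        = ((PySem.List.permutations rem rem.length).filter (fun j => !aFlag i j pos)).map (acc ++ ·)) :
    ∀ (right left : List Int) (pos : Nat) (acc : List Int),
      left.length + right.length ≤ N + 1 →
      bLoop i pos left right acc
        = (((List.range' left.length right.length).flatMap (fun k =>
              match (left ++ right)[k]? with
              | none => []
              | some v => (PySem.List.permutations ((left ++ right).eraseIdx k)
                            (left.length + right.length - 1)).map (fun p => v :: p))).filter
            (fun j => !aFlag i j pos)).map (acc ++ ·) := by
  intro right
  induction right with
  | nil => intro left pos acc _; rw [bLoop.eq_def]; dsimp only; simp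
  | cons v rest ih =>
    intro left pos acc hlen
    rw [bLoop.eq_def]; dsimp only
    rw [List.length_cons, List.range'_succ, List.flatMap_cons]
    have hget : (left ++ v :: rest)[left.length]? = some v := by
      simp
    have herase : (left ++ v :: rest).eraseIdx left.length = left ++ rest := by
      rw [List.eraseIdx_append_of_length_le (le_refl _)]
      simp
    rw [hget]; dsimp only
    rw [herase, List.filter_append, List.map_append]
    have harith : left.length + (rest.length + 1) - 1 = (left ++ rest).length := by
      simp
    rw [harith]
    congr 1
    · -- head of the loop: value v at index left.length
      by_cases hc : PySem.List.pyGet? i (pos : Int) = some v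
      · have hkill : ∀ j, (!aFlag i (v :: j) pos) = false := by
          intro j; simp [aFlag, hc]
        rw [if_neg (by simp [hc]), List.filter_map,
          List.filter_eq_nil_iff.mpr (by intro j _; simp [Function.comp, hkill])]
        simp
      · rw [if_pos hc, IH (left ++ rest) (pos + 1) (acc ++ [v]) (by simp at hlen ⊢; omega)]
        rw [List.filter_map]
        rw [PySem.List.pyGet?_natCast] at hc
        have hcomp : (fun j => !aFlag i j pos) ∘ (fun p => v :: p) = fun j => !aFlag i j (pos + 1) := by
          funext j; simp [Function.comp, aFlag, hc]
        rw [hcomp, List.map_map]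
        apply List.map_congr_left
        intro j _
        simp
    · -- rest of the loop, with left grown by v
      have h2 : (left ++ [v]).length + rest.length ≤ N + 1 := by simp at hlen ⊢; omega
      rw [ih (left ++ [v]) pos acc h2]
      have hl : (left ++ [v]).length = left.length + 1 := by simp
      have hlist : (left ++ [v]) ++ rest = left ++ v :: rest := by simp
      rw [hl, hlist]
      have harith2 : left.length + 1 + rest.length - 1 = (left ++ rest).length := by
        simp
      rw [harith2]

-- the backtracking generator equals A's generate-then-filter, for any start position and prefix
lemma rec_eq (i : List Int) : ∀ (N : Nat) (rem : List Int) (pos : Nat) (acc : List Int),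
    rem.length ≤ N →
    bRec i pos rem acc
      = ((PySem.List.permutations rem rem.length).filter (fun j => !aFlag i j pos)).map (acc ++ ·) := by
  intro N
  induction N with
  | zero =>
    intro rem pos acc h
    have : rem = [] := List.length_eq_zero_iff.mp (Nat.le_zero.mp h)
    subst this
    rw [bRec.eq_def]; dsimp only
    simp [aFlag]
  | succ N ihN =>
    intro rem pos acc h
    match rem with
    | [] => rw [bRec.eq_def]; dsimp only; simp [aFlag]
    | v :: rest =>
      rw [bRec.eq_def]; dsimp only
      rw [List.length_cons, perms_succ]
      have := loop_eq i N ihN (v :: rest) [] pos acc (by simpa using h)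
      simpa [List.range_eq_range'] using this

-- ===== VERDICT (by name: the statement is the Claim_ definition above) =====
theorem get_non_intersecting_permutations_spec : Claim_equal_get_non_intersecting_permutations := by
  intro i n _ _
  unfold Spec_get_non_intersecting_permutations
  unfold get_non_intersecting_permutations get_non_intersecting_permutations_alt
  rw [rec_eq i (PySem.List.pyRange 1 (n + 1) 1).length _ 0 [] (le_refl _)]
  have : (fun (acc : List (List Int)) (j : List Int) => if aFlag i j 0 then acc else acc ++ [j])
       = (fun acc j => if !aFlag i j 0 then acc ++ [j] else acc) := by
    funext acc j; cases aFlag i j 0 <;> rfl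
  rw [this, PySem.List.foldl_append_if_eq_filter]
  simp
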